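-- pv_equiv track=rewrite | github.com/TheoDlmz/DBCOMSOC | winners/pw.py | aggregate_plurality
-- ===== SOURCE A (Python) =====
-- def aggregate_plurality(roots_list,m):
--     dico_roots = dict()
--     tab_roots = []
--     count_roots = []
--     i = 0
--     for roots_i in roots_list:
--         if str(roots_i) in dico_roots.keys():
--             count_roots[dico_roots[str(roots_i)]] += 1
--         else:
--             count_roots.append(1)
--             tab_roots.append(roots_i)
--             dico_roots[str(roots_i)] = i
--             i+=1
--     return tab_roots,count_roots
-- ===== SOURCE B (Python) =====
-- def aggregate_plurality(roots_list, m):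
--     # Pass 1: total multiplicity of every key over the whole input.
--     counts = {}
--     for r in roots_list:
--         k = str(r)
--         counts[k] = counts.get(k, 0) + 1
--     # Pass 2: emit each first occurrence with its (already final) total count.
--     seen = set()
--     tab_roots = []
--     count_roots = []
--     for r in roots_list:
--         k = str(r)
--         if k not in seen:
--             seen.add(k)
--             tab_roots.append(r)
--             count_roots.append(counts[k])
--     return tab_roots, count_roots
-- ===== Notes on version B (the rewrite author's own statement) =====
-- stated objective: alternative
-- what changed: Counting is split off from output construction: a first pass builds a total-count table per key, then a second pass over the input dedups first occurrences with a set and emits each root with its already-final count, so the output count list is never updated in place and no key-to-index bookkeeping exists.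
import Mathlib
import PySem

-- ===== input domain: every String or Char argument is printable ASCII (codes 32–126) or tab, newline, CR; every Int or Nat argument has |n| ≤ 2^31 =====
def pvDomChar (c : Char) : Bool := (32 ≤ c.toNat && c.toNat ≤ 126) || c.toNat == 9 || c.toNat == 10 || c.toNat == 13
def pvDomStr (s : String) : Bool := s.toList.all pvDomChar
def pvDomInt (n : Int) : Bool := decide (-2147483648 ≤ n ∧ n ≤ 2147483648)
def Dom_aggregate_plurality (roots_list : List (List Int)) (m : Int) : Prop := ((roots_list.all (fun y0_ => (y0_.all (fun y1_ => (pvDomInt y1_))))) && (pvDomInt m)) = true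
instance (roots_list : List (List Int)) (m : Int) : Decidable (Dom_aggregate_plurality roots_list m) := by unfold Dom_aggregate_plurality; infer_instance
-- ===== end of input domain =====

-- B splits A's single incremental-counting pass into two staged passes: a total-count table per key,
-- then a set-based dedup pass emitting each first occurrence with its final count (alternative decomposition).

-- str(roots_i) for a Python list of ints: "[a, b, …]" (exact: Python's repr of an int list)
def pvKey (xs : List Int) : String :=
  PySem.Str.join "" ["[", PySem.Str.join ", " (xs.map PySem.Int.toStr), "]"]

-- ===== PORT A =====
-- state = (dico_roots, tab_roots, count_roots, i)
def aggAStep (st : PySem.Dict String Int × List (List Int) × List Int × Int)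
    (roots_i : List Int) : PySem.Dict String Int × List (List Int) × List Int × Int :=
  match st with
  | (dico, tab, cnt, i) =>
    let s := pvKey roots_i
    if dico.contains s then
      -- count_roots[dico_roots[str(roots_i)]] += 1 : the stored index is always a valid
      -- nonnegative position into count_roots, so getD/toNat/set are exact here
      let idx := (dico.getD s 0).toNat
      (dico, tab, cnt.set idx (cnt.getD idx 0 + 1), i)
    else
      (dico.insert s i, tab ++ [roots_i], cnt ++ [1], i + 1)

def aggregate_plurality (roots_list : List (List Int)) (m : Int) : List (List Int) × List Int :=
  let st := roots_list.foldl aggAStep (PySem.Dict.empty, [], [], 0)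
  (st.2.1, st.2.2.1)

-- ===== PORT B =====
-- pass 1: counts[k] = counts.get(k, 0) + 1 over the whole input
def aggCounts (roots_list : List (List Int)) : PySem.Dict String Int :=
  roots_list.foldl (fun d r => d.insert (pvKey r) (d.getD (pvKey r) 0 + 1)) PySem.Dict.empty

-- pass 2 body; state = (seen, tab_roots, count_roots).
-- counts[k] is ported as getD: k is always a key of counts here, since counts was built
-- from every element of the same list, so the KeyError branch is unreachable (exact).
def aggBStep (counts : PySem.Dict String Int)
    (st : PySem.Set String × List (List Int) × List Int) (r : List Int) :
    PySem.Set String × List (List Int) × List Int :=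
  let k := pvKey r
  if PySem.Set.contains st.1 k then st
  else (PySem.Set.add st.1 k, st.2.1 ++ [r], st.2.2 ++ [counts.getD k 0])

def aggregate_plurality_alt (roots_list : List (List Int)) (m : Int) : List (List Int) × List Int :=
  let counts := aggCounts roots_list
  let st := roots_list.foldl (aggBStep counts) (PySem.Set.empty, [], [])
  (st.2.1, st.2.2)

-- ===== PRECONDITION & SPEC =====
def Spec_aggregate_plurality (roots_list : List (List Int)) (m : Int) (out : List (List Int) × List Int) : Prop := out = aggregate_plurality_alt roots_list m
instance (roots_list : List (List Int)) (m : Int) (out : List (List Int) × List Int) : Decidable (Spec_aggregate_plurality roots_list m out) := by unfold Spec_aggregate_plurality; infer_instance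

-- ===== CLAIM (what is proved, stated in full; the proofs are below) =====
def Claim_equal_aggregate_plurality : Prop := ∀ (roots_list : List (List Int)) (m : Int), Dom_aggregate_plurality roots_list m → Spec_aggregate_plurality roots_list m (aggregate_plurality roots_list m)

-- ===== LEMMAS AND PROOFS =====

-- total multiplicity of key k in l
def cntK (k : String) (l : List (List Int)) : Int := ((l.map pvKey).count k : Int)

-- first occurrences of l whose key is not in seen
def dedupA (seen : List String) : List (List Int) → List (List Int)
  | [] => []
  | r :: t => if pvKey r ∈ seen then dedupA seen t else r :: dedupA (pvKey r :: seen) t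

-- A's index dict as an association list
def keyIdx (off : Int) : List String → List (String × Int)
  | [] => []
  | k :: ks => (k, off) :: keyIdx (off + 1) ks

-- keys of A's running (root, count) table
def tlKeys (tl : List (List Int × Int)) : List String := tl.map (fun p => pvKey p.1)

-- A's final table, predicted from a mid-loop table tl and the remaining input
def finTl (tl : List (List Int × Int)) (rest : List (List Int)) : List (List Int × Int) :=
  tl.map (fun p => (p.1, p.2 + cntK (pvKey p.1) rest))
    ++ (dedupA (tlKeys tl) rest).map (fun r => (r, cntK (pvKey r) rest))

theorem cntK_cons (k : String) (r : List Int) (t : List (List Int)) :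
    cntK k (r :: t) = cntK k t + (if pvKey r = k then 1 else 0) := by
  by_cases h : pvKey r = k
  · simp [cntK, h]
  · simp [cntK, h]

theorem dedupA_congr (seen seen' : List String) (h : ∀ k, k ∈ seen ↔ k ∈ seen') :
    ∀ l, dedupA seen l = dedupA seen' l := by
  intro l
  induction l generalizing seen seen' with
  | nil => rfl
  | cons r t ih =>
    by_cases hm : pvKey r ∈ seen
    · simp [dedupA, hm, (h _).mp hm, ih seen seen' h]
    · have hm' : pvKey r ∉ seen' := fun hx => hm ((h _).mpr hx)
      simp only [dedupA, if_neg hm, if_neg hm']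
      rw [ih (pvKey r :: seen) (pvKey r :: seen') (by intro k; simp [h k])]

theorem dedupA_key_not_mem (seen : List String) :
    ∀ l r', r' ∈ dedupA seen l → pvKey r' ∉ seen := by
  intro l
  induction l generalizing seen with
  | nil => simp [dedupA]
  | cons r t ih =>
    intro r' hr'
    by_cases hm : pvKey r ∈ seen
    · exact ih seen r' (by simpa [dedupA, hm] using hr')
    · simp only [dedupA, if_neg hm, List.mem_cons] at hr'
      rcases hr' with rfl | hr'
      · exact hm
      · intro hs
        exact ih (pvKey r :: seen) r' hr' (List.mem_cons_of_mem _ hs)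

theorem keys_keyIdx (off : Int) (ks : List String) :
    (keyIdx off ks).map (·.1) = ks := by
  induction ks generalizing off with
  | nil => rfl
  | cons k ks ih => simp [keyIdx, ih]

theorem keyIdx_append_singleton (ks : List String) (k : String) : ∀ off : Int,
    keyIdx off (ks ++ [k]) = keyIdx off ks ++ [(k, off + ks.length)] := by
  induction ks with
  | nil => intro off; simp [keyIdx]
  | cons k' ks ih =>
    intro off
    simp only [List.cons_append, keyIdx, ih, List.length_cons]
    have h2 : off + 1 + (ks.length : Int) = off + ((ks.length + 1 : Nat) : Int) := by
      push_cast; ring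
    rw [h2]

theorem getD_keyIdx (s : String) (ks : List String) (hs : s ∈ ks) : ∀ off : Int,
    (PySem.Dict.mk (keyIdx off ks)).getD s 0 = off + (ks.idxOf s : Int) := by
  induction ks with
  | nil => simp at hs
  | cons k ks ih =>
    intro off
    by_cases h : k = s
    · simp [keyIdx, PySem.Dict.getD, PySem.Dict.get?, h]
    · have hs' : s ∈ ks := by
        rcases List.mem_cons.mp hs with rfl | hx
        · exact absurd rfl h
        · exact hx
      have hne : (k == s) = false := by simp [h]
      have hstep : (PySem.Dict.mk (keyIdx off (k :: ks))).getD s 0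
          = (PySem.Dict.mk (keyIdx (off + 1) ks)).getD s 0 := by
        rw [show keyIdx off (k :: ks) = (k, off) :: keyIdx (off + 1) ks from rfl]
        rw [PySem.Dict.getD_eq_get?_getD, PySem.Dict.getD_eq_get?_getD,
          PySem.Dict.get?_mk_cons, hne]
        simp
      rw [hstep, ih hs' (off + 1)]
      simp only [List.idxOf_cons, hne, cond_false]
      push_cast
      ring

-- in-place count bump at key s, seen through (·.2), is set at idxOf s
set_option maxHeartbeats 1000000 in
theorem crux (s : String) (tl : List (List Int × Int))
    (hnd : (tlKeys tl).Nodup) (hs : s ∈ tlKeys tl) :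
    (tl.map (fun p => if pvKey p.1 = s then (p.1, p.2 + 1) else p)).map (·.2)
      = (tl.map (·.2)).set ((tlKeys tl).idxOf s)
          ((tl.map (·.2)).getD ((tlKeys tl).idxOf s) 0 + 1) := by
  induction tl with
  | nil => simp [tlKeys] at hs
  | cons p tl ih =>
    simp only [tlKeys, List.map_cons, List.nodup_cons] at hnd
    by_cases h : pvKey p.1 = s
    · have hnot : ∀ q ∈ tl, ¬ (pvKey q.1 = s) := by
        intro q hq hqs
        exact hnd.1 (h ▸ hqs ▸ (List.mem_map_of_mem hq))
      have htail : tl.map (fun p => if pvKey p.1 = s then (p.1, p.2 + 1) else p) = tl := by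
        have h1 : tl.map (fun p => if pvKey p.1 = s then (p.1, p.2 + 1) else p) = tl.map id :=
          List.map_congr_left (fun q hq => by simp [hnot q hq])
        rw [h1, List.map_id]
      rw [List.map_cons, if_pos h, htail]
      simp [tlKeys, h]
    · have hs' : s ∈ tlKeys tl := by
        simp only [tlKeys, List.map_cons, List.mem_cons] at hs
        tauto
      have hne : (pvKey p.1 == s) = false := by simp [h]
      simp only [List.map_cons, if_neg h, tlKeys, List.idxOf_cons, hne, cond_false,
        List.getD_cons_succ, List.set_cons_succ]
      rw [ih hnd.2 hs']
      simp [tlKeys]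

theorem tlKeys_update (s : String) (tl : List (List Int × Int)) :
    tlKeys (tl.map (fun p => if pvKey p.1 = s then (p.1, p.2 + 1) else p)) = tlKeys tl := by
  simp only [tlKeys, List.map_map]
  apply List.map_congr_left
  intro p _
  by_cases h : pvKey p.1 = s <;> simp [h]

-- A's loop invariant
set_option maxHeartbeats 2000000 in
theorem invA (rest : List (List Int)) :
    ∀ tl : List (List Int × Int), (tlKeys tl).Nodup →
    rest.foldl aggAStep
        (PySem.Dict.mk (keyIdx 0 (tlKeys tl)), tl.map (·.1), tl.map (·.2), (tl.length : Int))
      = (PySem.Dict.mk (keyIdx 0 (tlKeys (finTl tl rest))),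
         (finTl tl rest).map (·.1), (finTl tl rest).map (·.2),
         ((finTl tl rest).length : Int)) := by
  induction rest with
  | nil =>
    intro tl _
    simp [finTl, dedupA, cntK, tlKeys]
  | cons r rest ih =>
    intro tl hnd
    set s := pvKey r with hsdef
    have hkeysA : (PySem.Dict.mk (keyIdx 0 (tlKeys tl))).keys = tlKeys tl := by
      rw [PySem.Dict.keys_mk, keys_keyIdx]
    by_cases hmem : s ∈ tlKeys tl
    · -- existing key: in-place bump
      have hc : (PySem.Dict.mk (keyIdx 0 (tlKeys tl))).contains s = true := by
        rw [PySem.Dict.contains_eq_decide_mem_keys, hkeysA, decide_eq_true_iff]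
        exact hmem
      set tl₁ := tl.map (fun p => if pvKey p.1 = s then (p.1, p.2 + 1) else p) with htl₁
      have hkeys₁ : tlKeys tl₁ = tlKeys tl := tlKeys_update s tl
      have hfst : tl₁.map (·.1) = tl.map (·.1) := by
        simp only [htl₁, List.map_map]
        apply List.map_congr_left
        intro p _
        by_cases h : pvKey p.1 = s <;> simp [h]
      have hidx : ((PySem.Dict.mk (keyIdx 0 (tlKeys tl))).getD s 0).toNat
          = (tlKeys tl).idxOf s := by
        rw [getD_keyIdx s (tlKeys tl) hmem 0]
        simp
      have hAstep : aggAStep (PySem.Dict.mk (keyIdx 0 (tlKeys tl)), tl.map (·.1),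
            tl.map (·.2), (tl.length : Int)) r
          = (PySem.Dict.mk (keyIdx 0 (tlKeys tl₁)), tl₁.map (·.1), tl₁.map (·.2),
             (tl₁.length : Int)) := by
        simp only [aggAStep, ← hsdef, hc, if_true, hidx, hkeys₁, hfst]
        rw [crux s tl hnd hmem]
        simp [htl₁]
      have hfin : finTl tl₁ rest = finTl tl (r :: rest) := by
        simp only [finTl, hkeys₁]
        congr 1
        · simp only [htl₁, List.map_map]
          apply List.map_congr_left
          intro p _
          by_cases h : pvKey p.1 = s
          · simp [h, cntK_cons, hsdef]
            ring
          · have : ¬ pvKey r = pvKey p.1 := fun hx => h (hsdef ▸ hx.symm)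
            simp [h, cntK_cons, this]
        · have hded : dedupA (tlKeys tl) (r :: rest) = dedupA (tlKeys tl) rest := by
            simp [dedupA, ← hsdef, hmem]
          rw [hded]
          apply List.map_congr_left
          intro r' hr'
          have hne : ¬ pvKey r = pvKey r' := by
            intro hx
            refine dedupA_key_not_mem (tlKeys tl) rest r' hr' ?_
            rw [hsdef] at hmem
            rw [← hx]
            exact hmem
          simp [cntK_cons, hne]
      rw [List.foldl_cons, hAstep, ih tl₁ (hkeys₁ ▸ hnd), hfin]
    · -- new key: append
      have hc : (PySem.Dict.mk (keyIdx 0 (tlKeys tl))).contains s = false := by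
        rw [PySem.Dict.contains_eq_decide_mem_keys, hkeysA]
        simpa using hmem
      set tl₁ := tl ++ [(r, (1 : Int))] with htl₁
      have hkeys₁ : tlKeys tl₁ = tlKeys tl ++ [s] := by
        simp [htl₁, tlKeys, hsdef]
      have hAstep : aggAStep (PySem.Dict.mk (keyIdx 0 (tlKeys tl)), tl.map (·.1),
            tl.map (·.2), (tl.length : Int)) r
          = (PySem.Dict.mk (keyIdx 0 (tlKeys tl₁)), tl₁.map (·.1), tl₁.map (·.2),
             (tl₁.length : Int)) := by
        simp only [aggAStep, ← hsdef, hc, Bool.false_eq_true, if_false]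
        refine Prod.ext ?_ (Prod.ext ?_ (Prod.ext ?_ ?_))
        · apply PySem.Dict.ext
          rw [PySem.Dict.items_insert_of_not_contains _ _ hc, hkeys₁,
            keyIdx_append_singleton (tlKeys tl) s 0]
          simp [tlKeys]
        · simp [htl₁]
        · simp [htl₁]
        · simp [htl₁]
      have hnd₁ : (tlKeys tl₁).Nodup := by
        rw [hkeys₁, List.nodup_append]
        refine ⟨hnd, List.nodup_singleton _, ?_⟩
        intro a ha b hb
        rw [List.mem_singleton] at hb
        subst hb
        exact fun h => hmem (h ▸ ha)
      have hfin : finTl tl₁ rest = finTl tl (r :: rest) := by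
        have hded : dedupA (tlKeys tl) (r :: rest) = r :: dedupA (s :: tlKeys tl) rest := by
          simp [dedupA, ← hsdef, hmem]
        have hded₁ : dedupA (tlKeys tl₁) rest = dedupA (s :: tlKeys tl) rest := by
          rw [hkeys₁]
          exact dedupA_congr _ _ (by intro k; simp [or_comm]) rest
        unfold finTl
        rw [hded₁, hded, htl₁]
        simp only [List.map_append, List.map_cons, List.map_nil, List.append_assoc,
          List.cons_append, List.nil_append]
        congr 1
        · apply List.map_congr_left
          intro p hp
          have hne : ¬ pvKey r = pvKey p.1 := by
            intro hx
            refine hmem ?_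
            rw [hsdef, hx]
            exact List.mem_map_of_mem hp
          simp [cntK_cons, hne]
        · congr 1
          · simp [cntK_cons]
            ring
          · apply List.map_congr_left
            intro r' hr'
            have hne : ¬ pvKey r = pvKey r' := by
              intro hx
              refine dedupA_key_not_mem (s :: tlKeys tl) rest r' hr' ?_
              rw [← hx, hsdef]
              exact List.mem_cons_self
            simp [cntK_cons, hne]
      rw [List.foldl_cons, hAstep, ih tl₁ hnd₁, hfin]

-- B's counting loop, reshaped as a fold over the key list
theorem aggCounts_eq_map (l : List (List Int)) :
    ∀ d : PySem.Dict String Int,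
    l.foldl (fun d r => d.insert (pvKey r) (d.getD (pvKey r) 0 + 1)) d
      = (l.map pvKey).foldl (fun d x => d.insert x (d.getD x 0 + 1)) d := by
  induction l with
  | nil => intro d; rfl
  | cons r t ih => intro d; simp [ih]

-- B's count table is cntK
theorem aggCounts_getD (roots_list : List (List Int)) (k : String) :
    (aggCounts roots_list).getD k 0 = cntK k roots_list := by
  unfold aggCounts cntK
  rw [aggCounts_eq_map, PySem.Dict.getD_foldl_insert_add_one]
  simp

-- B's second-pass invariant
theorem invB (c : PySem.Dict String Int) (rest : List (List Int)) :
    ∀ (seen : PySem.Set String) (tab : List (List Int)) (cnt : List Int),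
    rest.foldl (aggBStep c) (seen, tab, cnt)
      = ((rest.map pvKey).foldl PySem.Set.add seen,
         tab ++ dedupA seen rest,
         cnt ++ (dedupA seen rest).map (fun r => c.getD (pvKey r) 0)) := by
  induction rest with
  | nil => intro seen tab cnt; simp [dedupA]
  | cons r rest ih =>
    intro seen tab cnt
    by_cases hm : pvKey r ∈ seen
    · have hc : PySem.Set.contains seen (pvKey r) = true := by
        rw [PySem.Set.contains_iff]; exact hm
      have hadd : PySem.Set.add seen (pvKey r) = seen := PySem.Set.add_of_mem hm
      simp only [List.foldl_cons, List.map_cons, aggBStep, hc, if_true, ih, dedupA, if_pos hm,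
        hadd]
    · have hc : PySem.Set.contains seen (pvKey r) = false := by
        cases h : PySem.Set.contains seen (pvKey r)
        · rfl
        · exact absurd ((PySem.Set.contains_iff seen (pvKey r)).mp h) hm
      have hadd : PySem.Set.add seen (pvKey r) = seen ++ [pvKey r] :=
        PySem.Set.add_of_not_mem hm
      simp only [List.foldl_cons, List.map_cons, aggBStep, hc, Bool.false_eq_true, if_false,
        ih, dedupA, if_neg hm]
      rw [hadd]
      have hded : dedupA (seen ++ [pvKey r]) rest = dedupA (pvKey r :: seen) rest :=
        dedupA_congr _ _ (by intro k; simp [or_comm]) rest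
      simp [hded]

-- A's invariant instantiated at the start state
theorem invA_nil (rs : List (List Int)) :
    rs.foldl aggAStep (PySem.Dict.empty, [], [], 0)
      = (PySem.Dict.mk (keyIdx 0 ((dedupA [] rs).map pvKey)),
         dedupA [] rs, (dedupA [] rs).map (fun r => cntK (pvKey r) rs),
         ((dedupA [] rs).length : Int)) := by
  have hA := invA rs [] (by simp [tlKeys])
  have hfin : finTl [] rs = (dedupA [] rs).map (fun r => (r, cntK (pvKey r) rs)) := by
    simp [finTl, tlKeys]
  rw [hfin] at hA
  simpa [tlKeys, keyIdx, List.map_map, Function.comp_def] using hA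

-- B's invariant instantiated at the start state
theorem invB_nil (c : PySem.Dict String Int) (rs : List (List Int)) :
    rs.foldl (aggBStep c) (PySem.Set.empty, [], [])
      = ((rs.map pvKey).foldl PySem.Set.add PySem.Set.empty,
         dedupA [] rs, (dedupA [] rs).map (fun r => c.getD (pvKey r) 0)) := by
  simpa using invB c rs PySem.Set.empty [] []

-- ===== VERDICT (by name: the statement is the Claim_ definition above) =====
theorem aggregate_plurality_spec : Claim_equal_aggregate_plurality := by
  intro roots_list m _
  show aggregate_plurality roots_list m = aggregate_plurality_alt roots_list m
  simp only [aggregate_plurality, aggregate_plurality_alt]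
  rw [invA_nil, invB_nil]
  simp [aggCounts_getD]
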